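-- pv_equiv track=rewrite | github.com/danisenn/lakehouse | legacy/schema_map.py | build_semantic_links
-- ===== SOURCE A (Python) =====
-- from collections import defaultdict
--
-- def build_semantic_links(schema_map):
--     column_to_tables = defaultdict(list)
--
--     for table, columns in schema_map.items():
--         for col in columns:
--             col_name = col["column_name"].lower()
--             column_to_tables[col_name].append(table)
--
--     # Keep only columns appearing in more than one table
--     semantic_links = {col: tables for col, tables in column_to_tables.items() if len(tables) > 1}
--     return semantic_links
-- ===== SOURCE B (Python) =====
-- def build_semantic_links(schema_map):
--     # Flat pair list + per-distinct-name scan (no defaultdict inverted index).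
--     pairs = []
--     for table, columns in schema_map.items():
--         for col in columns:
--             pairs.append((col["column_name"].lower(), table))
--     result = {}
--     for name, _ in pairs:
--         if name not in result:
--             tables = [t for n, t in pairs if n == name]
--             if len(tables) > 1:
--                 result[name] = tables
--     return result
-- ===== Notes on version B (the rewrite author's own statement) =====
-- stated objective: alternative
-- what changed: Replaces the defaultdict inverted index (name -> growing table list) by building a flat (lowered name, table) pair list once and, for each first occurrence of a name, scanning that flat list to collect its tables, emitting it only when more than one table matches.
import Mathlib
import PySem

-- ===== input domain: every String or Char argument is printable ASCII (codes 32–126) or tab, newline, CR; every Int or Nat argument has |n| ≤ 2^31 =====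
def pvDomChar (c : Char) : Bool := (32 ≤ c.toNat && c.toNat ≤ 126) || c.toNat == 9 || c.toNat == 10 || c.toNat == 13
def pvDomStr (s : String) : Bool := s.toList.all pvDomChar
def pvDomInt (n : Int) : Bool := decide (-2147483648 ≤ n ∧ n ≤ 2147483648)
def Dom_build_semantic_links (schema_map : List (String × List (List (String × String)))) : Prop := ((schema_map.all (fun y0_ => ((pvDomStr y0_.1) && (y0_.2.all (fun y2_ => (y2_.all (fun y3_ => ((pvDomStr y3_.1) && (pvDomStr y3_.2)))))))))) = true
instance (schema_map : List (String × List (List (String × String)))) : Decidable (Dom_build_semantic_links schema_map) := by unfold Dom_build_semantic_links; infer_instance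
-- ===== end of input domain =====

-- B is an alternative decomposition: a flat (lowered name, table) pair list scanned once per
-- distinct name, instead of A's defaultdict inverted index; same return value (no speed claim).

-- ===== PORT A =====
-- col["column_name"].lower(): first-match association-list lookup (the assoc list models a Python
-- dict, so the first match is exact); the "" default is never reached inside Pre_ (key present).
def pvColName (col : List (String × String)) : String :=
  PySem.Str.lower (((col.find? (fun p => p.1 == "column_name")).map (·.2)).getD "")

def build_semantic_links (schema_map : List (String × List (List (String × String)))) : List (String × List String) :=
  -- for table, columns in schema_map.items(): for col in columns: column_to_tables[name].append(table)
  ((schema_map.foldl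
      (fun d tc => tc.2.foldl (fun d col => d.modify (pvColName col) [] (· ++ [tc.1])) d)
      (PySem.Dict.empty : PySem.Dict String (List String))).items).filter
    -- dict comprehension over the items of a dict (unique keys, insertion order) = filter of items
    (fun p => decide (1 < p.2.length))

-- ===== PORT B =====
def build_semantic_links_alt (schema_map : List (String × List (List (String × String)))) : List (String × List String) :=
  let pairs : List (String × String) :=
    schema_map.foldl (fun acc tc => tc.2.foldl (fun acc col => acc ++ [(pvColName col, tc.1)]) acc) []
  let result : PySem.Dict String (List String) :=
    pairs.foldl
      (fun res p =>
        if res.contains p.1 then res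
        else
          let tables := (pairs.filter (fun q => q.1 == p.1)).map (·.2)
          if 1 < tables.length then res.insert p.1 tables else res)
      PySem.Dict.empty
  result.items

-- ===== PRECONDITION & SPEC =====
-- Pre_ excludes exactly the inputs where A raises KeyError: some column dict lacks "column_name".
def Pre_build_semantic_links (schema_map : List (String × List (List (String × String)))) : Prop :=
  (schema_map.all (fun tc => tc.2.all (fun col => col.any (fun p => p.1 == "column_name")))) = true
instance (schema_map : List (String × List (List (String × String)))) : Decidable (Pre_build_semantic_links schema_map) := by unfold Pre_build_semantic_links; infer_instance

def pvWitness_build_semantic_links : (List (String × List (List (String × String)))) :=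
  [("t1", [[("column_name", "Id")], [("column_name", "ID")]]), ("t2", [[("column_name", "id")]])]

def Spec_build_semantic_links (schema_map : List (String × List (List (String × String)))) (out : List (String × List String)) : Prop := out = build_semantic_links_alt schema_map
instance (schema_map : List (String × List (List (String × String)))) (out : List (String × List String)) : Decidable (Spec_build_semantic_links schema_map out) := by unfold Spec_build_semantic_links; infer_instance

-- ===== CLAIM (what is proved, stated in full; the proofs are below) =====
def Claim_equal_build_semantic_links : Prop := ∀ (schema_map : List (String × List (List (String × String)))), Dom_build_semantic_links schema_map → Pre_build_semantic_links schema_map → Spec_build_semantic_links schema_map (build_semantic_links schema_map)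

-- ===== LEMMAS AND PROOFS =====

-- the flattened (lowered column name, table) pair list both algorithms are about
def pvPairs (sm : List (String × List (List (String × String)))) : List (String × String) :=
  sm.flatMap (fun tc => tc.2.map (fun col => (pvColName col, tc.1)))

def pvG (sm : List (String × List (List (String × String)))) (k : String) : List String :=
  ((pvPairs sm).filter (fun q => q.1 == k)).map (·.2)

def pvF (sm : List (String × List (List (String × String)))) (k : String) : Option (String × List String) :=
  if 1 < (pvG sm k).length then some (k, pvG sm k) else none

-- the nested table/column loop is the loop over the flattened pair list
theorem pv_nested {σ : Type} (sm : List (String × List (List (String × String))))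
    (step : σ → (String × String) → σ) (init : σ) :
    sm.foldl (fun s tc => tc.2.foldl (fun s col => step s (pvColName col, tc.1)) s) init
      = (pvPairs sm).foldl step init := by
  induction sm generalizing init with
  | nil => rfl
  | cons tc rest ih => simp [pvPairs, List.foldl_append, List.foldl_map, ih, List.flatMap_cons]

theorem pvPairs_eq_foldl (sm : List (String × List (List (String × String)))) :
    sm.foldl (fun acc tc => tc.2.foldl (fun acc col => acc ++ [(pvColName col, tc.1)]) acc) [] = pvPairs sm := by
  exact (pv_nested sm (fun acc p => acc ++ [p]) []).trans
    (by rw [PySem.List.foldl_append_singleton_eq_self]; simp)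

theorem pv_A_char (sm : List (String × List (List (String × String)))) :
    build_semantic_links sm
      = ((PySem.Set.ofList ((pvPairs sm).map (·.1))).map (fun k => (k, pvG sm k))).filter
          (fun p => decide (1 < p.2.length)) := by
  have hD : (sm.foldl
      (fun d tc => tc.2.foldl (fun d col => d.modify (pvColName col) [] (· ++ [tc.1])) d)
      (PySem.Dict.empty : PySem.Dict String (List String)))
      = (pvPairs sm).foldl (fun d p => d.modify p.1 [] (· ++ [p.2])) PySem.Dict.empty :=
    pv_nested sm (fun (d : PySem.Dict String (List String)) (p : String × String) => PySem.Dict.modify d p.1 [] (· ++ [p.2])) PySem.Dict.empty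
  simp only [build_semantic_links]
  rw [hD]
  have hnd : ((pvPairs sm).foldl (fun d p => d.modify p.1 [] (· ++ [p.2])) PySem.Dict.empty).keys.Nodup := by
    exact PySem.Dict.nodup_keys_foldl_modify_key (pvPairs sm) (fun (p : String × String) => p.1) [] (fun _ (p : String × String) => (· ++ [p.2])) PySem.Dict.empty (by simp)
  rw [PySem.Dict.items_eq_map_keys _ hnd []]
  have hget : ∀ k, ((pvPairs sm).foldl (fun d p => d.modify p.1 [] (· ++ [p.2])) PySem.Dict.empty).getD k []
      = pvG sm k := by
    intro k
    rw [PySem.Dict.getD_foldl_modify_append]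
    simp [pvG]
  simp only [hget]
  rw [PySem.Dict.keys_foldl_modify_key]
  simp [PySem.Set.update_nil_left]

-- the fresh prefix of Set.update can be split off under drop
theorem pv_drop_update (s t l : List String) :
    (PySem.Set.update (s ++ t) l).drop s.length
      = t ++ (PySem.Set.update (s ++ t) l).drop (s ++ t).length := by
  rw [PySem.Set.update_eq_append_filter]
  rw [List.drop_left, List.append_assoc, List.drop_left]

-- main invariant for B's accumulation loop: seen collects every name already examined
theorem pv_B_loop (sm : List (String × List (List (String × String))))
    (ps : List (String × String)) (d : PySem.Dict String (List String)) (seen : List String)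
    (h1 : ∀ k ∈ d.keys, k ∈ seen)
    (h2 : ∀ k ∈ seen, d.contains k = false → ¬ 1 < (pvG sm k).length) :
    (ps.foldl
        (fun res p =>
          if res.contains p.1 then res
          else if 1 < (pvG sm p.1).length then res.insert p.1 (pvG sm p.1) else res) d).items
      = d.items ++ ((PySem.Set.update seen (ps.map (·.1))).drop seen.length).filterMap (pvF sm) := by
  induction ps generalizing d seen with
  | nil => simp [PySem.Set.update_nil, List.drop_length]
  | cons p ps ih =>
    simp only [List.foldl_cons, List.map_cons, PySem.Set.update_cons]
    by_cases hc : d.contains p.1 = true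
    · have hm : p.1 ∈ seen := h1 _ ((PySem.Dict.contains_iff_mem_keys _ _).mp hc)
      rw [PySem.Set.add_of_mem hm]
      simp only [hc, if_true]
      exact ih d seen h1 h2
    · replace hc : d.contains p.1 = false := by simpa using hc
      simp only [hc, Bool.false_eq_true, if_false]
      by_cases hs : p.1 ∈ seen
      · have hlow := h2 _ hs hc
        rw [PySem.Set.add_of_mem hs, if_neg hlow]
        exact ih d seen h1 h2
      · rw [PySem.Set.add_of_not_mem hs]
        by_cases hg : 1 < (pvG sm p.1).length
        · rw [if_pos hg]
          have h1' : ∀ k ∈ (d.insert p.1 (pvG sm p.1)).keys, k ∈ seen ++ [p.1] := by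
            intro k hk
            rw [PySem.Dict.keys_insert_of_not_contains _ _ hc] at hk
            rcases List.mem_append.mp hk with h | h
            · exact List.mem_append.mpr (Or.inl (h1 _ h))
            · exact List.mem_append.mpr (Or.inr h)
          have h2' : ∀ k ∈ seen ++ [p.1], (d.insert p.1 (pvG sm p.1)).contains k = false
              → ¬ 1 < (pvG sm k).length := by
            intro k hk hck
            rw [PySem.Dict.contains_insert] at hck
            rcases List.mem_append.mp hk with h | h
            · exact h2 _ h (by simpa using (Bool.or_eq_false_iff.mp hck).2)
            · simp at h
              subst h
              simp at hck
          rw [ih (d.insert p.1 (pvG sm p.1)) (seen ++ [p.1]) h1' h2']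
          rw [PySem.Dict.items_insert_of_not_contains _ _ hc]
          rw [pv_drop_update seen [p.1]]
          simp [pvF, hg]
        · rw [if_neg hg]
          have h2' : ∀ k ∈ seen ++ [p.1], d.contains k = false → ¬ 1 < (pvG sm k).length := by
            intro k hk hck
            rcases List.mem_append.mp hk with h | h
            · exact h2 _ h hck
            · simp at h; subst h; exact hg
          have h1' : ∀ k ∈ d.keys, k ∈ seen ++ [p.1] :=
            fun k hk => List.mem_append.mpr (Or.inl (h1 _ hk))
          rw [ih d (seen ++ [p.1]) h1' h2']
          rw [pv_drop_update seen [p.1]]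
          simp [pvF, hg]

theorem pv_B_char (sm : List (String × List (List (String × String)))) :
    build_semantic_links_alt sm
      = (PySem.Set.ofList ((pvPairs sm).map (·.1))).filterMap (pvF sm) := by
  have h := pv_B_loop sm (pvPairs sm) PySem.Dict.empty []
    (by simp [PySem.Dict.keys_empty]) (by simp)
  simp only [build_semantic_links_alt, pvPairs_eq_foldl]
  simp only [pvG] at h
  simpa [PySem.Set.update_nil_left, PySem.Dict.items, PySem.Dict.empty] using h

theorem pv_map_filter_eq_filterMap (sm : List (String × List (List (String × String)))) (l : List String) :
    ((l.map (fun k => (k, pvG sm k))).filter (fun p => decide (1 < p.2.length)))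
      = l.filterMap (pvF sm) := by
  induction l with
  | nil => rfl
  | cons x xs ih =>
    rw [List.map_cons, List.filter_cons, List.filterMap_cons]
    have hf : pvF sm x = if 1 < (pvG sm x).length then some (x, pvG sm x) else none := rfl
    rw [hf]
    by_cases h : 1 < (pvG sm x).length
    · simp only [h, decide_true, if_true, ih]
    · simp only [h, decide_false, if_false, ih, Bool.false_eq_true]

-- ===== VERDICT (by name: the statement is the Claim_ definition above) =====
theorem build_semantic_links_spec : Claim_equal_build_semantic_links := by
  intro sm _ _
  unfold Spec_build_semantic_links
  rw [pv_A_char, pv_B_char, pv_map_filter_eq_filterMap]
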